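-- pv_equiv track=rewrite | github.com/3bicik/egzamin_probny | zad2.py | name_sorter
-- ===== SOURCE A (Python) =====
-- def name_sorter(names):
--     sorted_names = {
--         "male": [],
--         "female": []
--     }
--     for name in names:
--         if name[-1].lower() == "a":
--             sorted_names["female"].append(name)
--         else:
--             sorted_names["male"].append(name)
--     return sorted_names
-- ===== SOURCE B (Python) =====
-- def name_sorter(names):
--     # Stable sort by the boolean key (False = male first), then split at the
--     # first female: stability preserves the original relative order in each half.
--     by_sex = sorted(names, key=lambda n: n[-1].lower() == "a")
--     k = next((i for i, n in enumerate(by_sex) if n[-1].lower() == "a"),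
--              len(by_sex))
--     return {"male": by_sex[:k], "female": by_sex[k:]}
-- ===== Notes on version B (the rewrite author's own statement) =====
-- stated objective: alternative
-- what changed: Replaces A's single partitioning loop with a stable sort by the boolean last-letter key followed by a split at the first female name; stability makes the two halves equal A's lists.
import Mathlib
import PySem

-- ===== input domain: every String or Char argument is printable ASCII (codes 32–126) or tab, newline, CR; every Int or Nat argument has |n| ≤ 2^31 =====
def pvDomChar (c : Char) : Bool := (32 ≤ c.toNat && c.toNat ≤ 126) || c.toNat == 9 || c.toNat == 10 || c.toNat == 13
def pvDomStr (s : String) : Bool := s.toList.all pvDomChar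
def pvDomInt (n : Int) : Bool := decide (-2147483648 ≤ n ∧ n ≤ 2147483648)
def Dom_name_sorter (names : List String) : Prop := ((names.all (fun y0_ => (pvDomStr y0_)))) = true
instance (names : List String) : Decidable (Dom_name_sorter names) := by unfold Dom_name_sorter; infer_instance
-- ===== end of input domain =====

-- B replaces A's partitioning loop with a stable sort by the boolean last-letter
-- key followed by a split at the first female name (stability preserves order).

-- shared test: name[-1].lower() == "a" (both Pythons use this exact test; none = IndexError on "")
def nsIsFemale (name : String) : Bool :=
  match PySem.Str.pyGet? name (-1) with
  | some c => PySem.Chars.lowerChar c == 'a'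
  | none => false

-- ===== PORT A =====
def name_sorter (names : List String) : List (String × List String) :=
  let d0 : PySem.Dict String (List String) :=
    (PySem.Dict.empty.insert "male" []).insert "female" []
  (names.foldl (fun d name =>
      if nsIsFemale name then d.modify "female" [] (· ++ [name])
      else d.modify "male" [] (· ++ [name])) d0).items

-- ===== PORT B =====
def name_sorter_alt (names : List String) : List (String × List String) :=
  let bySex := PySem.List.sorted names (fun n => nsIsFemale n) false
  -- next((i for i, n in enumerate(by_sex) if …), len(by_sex))
  let k := (bySex.findIdx? (fun n => nsIsFemale n)).getD bySex.length
  -- by_sex[:k] / by_sex[k:] with 0 ≤ k ≤ len: exactly take/drop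
  [("male", bySex.take k), ("female", bySex.drop k)]

-- ===== PRECONDITION & SPEC =====
-- Pre_ excludes lists containing the empty string, on which Python A raises IndexError (name[-1]).
def Pre_name_sorter (names : List String) : Prop := ∀ n ∈ names, n ≠ ""
instance (names : List String) : Decidable (Pre_name_sorter names) := by unfold Pre_name_sorter; infer_instance
def pvWitness_name_sorter : List String := ["Anna", "Bob", "Eva"]

def Spec_name_sorter (names : List String) (out : List (String × List String)) : Prop := out = name_sorter_alt names
instance (names : List String) (out : List (String × List String)) : Decidable (Spec_name_sorter names out) := by unfold Spec_name_sorter; infer_instance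

-- ===== CLAIM =====
def Claim_equal_name_sorter : Prop := ∀ (names : List String), Dom_name_sorter names → Pre_name_sorter names → Spec_name_sorter names (name_sorter names)

-- ===== LEMMAS AND PROOFS =====
-- A's loop: items of the fold = prefix lists ++ the two filters
lemma ns_loop (names : List String) (m f : List String) :
    (names.foldl (fun d name =>
      if nsIsFemale name then d.modify "female" [] (· ++ [name])
      else d.modify "male" [] (· ++ [name]))
      (PySem.Dict.mk [("male", m), ("female", f)])).items
    = [("male", m ++ names.filter (fun n => !nsIsFemale n)),
       ("female", f ++ names.filter (fun n => nsIsFemale n))] := by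
  induction names generalizing m f with
  | nil => simp
  | cons n ns ih =>
    by_cases h : nsIsFemale n = true
    · have hd : (PySem.Dict.mk [("male", m), ("female", f)]).modify "female" [] (· ++ [n])
          = PySem.Dict.mk [("male", m), ("female", f ++ [n])] := by
        simp [PySem.Dict.modify, PySem.Dict.getD, PySem.Dict.get?, PySem.Dict.insert,
              PySem.Dict.contains]
      simp [h, hd, ih]
    · have hd : (PySem.Dict.mk [("male", m), ("female", f)]).modify "male" [] (· ++ [n])
          = PySem.Dict.mk [("male", m ++ [n]), ("female", f)] := by
        simp [PySem.Dict.modify, PySem.Dict.getD, PySem.Dict.get?, PySem.Dict.insert,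
              PySem.Dict.contains]
      simp [h, hd, ih]

-- the comparator used by sorted with reverse = false and key nsIsFemale
def nsBefore (a b : String) : Bool := decide (nsIsFemale a < nsIsFemale b)

lemma insertBy_all_false (x : String) (L : List String)
    (h : ∀ y ∈ L, nsBefore x y = false) :
    PySem.List.insertBy nsBefore x L = L ++ [x] := by
  induction L with
  | nil => simp [PySem.List.insertBy]
  | cons y ys ih =>
    have hy : nsBefore x y = false := h y (by simp)
    simp [PySem.List.insertBy, hy]
    exact ih (fun z hz => h z (by simp [hz]))

lemma nsBefore_eval (a b : String) :
    nsBefore a b = (!nsIsFemale a && nsIsFemale b) := by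
  unfold nsBefore
  cases ha : nsIsFemale a <;> cases hb : nsIsFemale b <;> decide

-- inserting a male into males ++ females puts it between the two blocks
lemma insertBy_male (x : String) (M F : List String)
    (hM : ∀ y ∈ M, nsIsFemale y = false) (hF : ∀ y ∈ F, nsIsFemale y = true)
    (hx : nsIsFemale x = false) :
    PySem.List.insertBy nsBefore x (M ++ F) = M ++ x :: F := by
  induction M with
  | nil =>
    cases F with
    | nil => simp [PySem.List.insertBy]
    | cons f fs =>
      have : nsBefore x f = true := by
        simp [nsBefore_eval, hx, hF f (by simp)]
      simp [PySem.List.insertBy, this]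
  | cons m ms ih =>
    have hm : nsBefore x m = false := by
      simp [nsBefore_eval, hM m (by simp)]
    have ih' := ih (fun y hy => hM y (by simp [hy]))
    simp [PySem.List.insertBy, hm, ih']

-- inserting a female appends at the end
lemma insertBy_female (x : String) (L : List String) (hx : nsIsFemale x = true) :
    PySem.List.insertBy nsBefore x L = L ++ [x] := by
  apply insertBy_all_false
  intro y _
  simp [nsBefore_eval, hx]

-- the sort's fold keeps males ++ females, each stable
lemma ns_sort_loop (xs : List String) (M F : List String)
    (hM : ∀ y ∈ M, nsIsFemale y = false) (hF : ∀ y ∈ F, nsIsFemale y = true) :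
    xs.foldl (fun acc x => PySem.List.insertBy nsBefore x acc) (M ++ F)
    = (M ++ xs.filter (fun n => !nsIsFemale n)) ++ (F ++ xs.filter (fun n => nsIsFemale n)) := by
  induction xs generalizing M F with
  | nil => simp
  | cons x rest ih =>
    by_cases hx : nsIsFemale x = true
    · have h1 : PySem.List.insertBy nsBefore x (M ++ F) = M ++ (F ++ [x]) := by
        rw [insertBy_female x _ hx]; simp
      simp only [List.foldl_cons, h1]
      rw [ih M (F ++ [x]) hM (by intro y hy; rcases List.mem_append.1 hy with h | h
                                 · exact hF y h
                                 · simp at h; simp [h, hx])]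
      simp [hx]
    · have hx' : nsIsFemale x = false := by simpa using hx
      have h1 : PySem.List.insertBy nsBefore x (M ++ F) = (M ++ [x]) ++ F := by
        rw [insertBy_male x M F hM hF hx']; simp
      simp only [List.foldl_cons, h1]
      rw [ih (M ++ [x]) F (by intro y hy; rcases List.mem_append.1 hy with h | h
                              · exact hM y h
                              · simp at h; simp [h, hx']) hF]
      simp [hx']

lemma ns_sorted_eq (names : List String) :
    PySem.List.sorted names (fun n => nsIsFemale n) false
    = names.filter (fun n => !nsIsFemale n) ++ names.filter (fun n => nsIsFemale n) := by
  have := ns_sort_loop names [] [] (by simp) (by simp)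
  simpa [PySem.List.sorted, nsBefore] using this

-- the split index of males ++ females is the number of males
lemma ns_k_eq (M F : List String)
    (hM : ∀ y ∈ M, nsIsFemale y = false) (hF : ∀ y ∈ F, nsIsFemale y = true) :
    (((M ++ F).findIdx? (fun n => nsIsFemale n)).getD (M ++ F).length) = M.length := by
  induction M with
  | nil =>
    cases F with
    | nil => simp
    | cons f fs => simp [List.findIdx?_cons, hF f (by simp)]
  | cons m ms ih =>
    have hm : nsIsFemale m = false := hM m (by simp)
    have ih' := ih (fun y hy => hM y (by simp [hy]))
    simp only [List.cons_append, List.findIdx?_cons, hm, Bool.false_eq_true, if_false]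
    cases h : (ms ++ F).findIdx? (fun n => nsIsFemale n) with
    | none => simp [h] at ih' ⊢; omega
    | some i => simp [h] at ih' ⊢; omega

-- ===== VERDICT =====
theorem name_sorter_spec : Claim_equal_name_sorter := by
  intro names _ _
  unfold Spec_name_sorter name_sorter name_sorter_alt
  have h0 : ((PySem.Dict.empty.insert "male" ([] : List String)).insert "female" [])
      = PySem.Dict.mk [("male", []), ("female", [])] := by decide
  have hM : ∀ y ∈ names.filter (fun n => !nsIsFemale n), nsIsFemale y = false := by
    intro y hy; simpa using (List.of_mem_filter hy)
  have hF : ∀ y ∈ names.filter (fun n => nsIsFemale n), nsIsFemale y = true := by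
    intro y hy; simpa using (List.of_mem_filter hy)
  simp only [h0, ns_loop, List.nil_append, ns_sorted_eq, ns_k_eq _ _ hM hF,
    List.take_left, List.drop_left]
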